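-- pv_equiv track=rewrite | github.com/EducationalTestingService/inquisitive-questions | src/data_analysis/inquisitive_distro.py | cal_length
-- ===== SOURCE A (Python) =====
-- def cal_length(df_text):
--     length = []
--     for row in df_text:
--         row = row.strip().split(' ')
--         if row[0]:
--             length.append(len(row))
--         else:
--             length.append(0)
--     return length
-- ===== SOURCE B (Python) =====
-- def cal_length(df_text):
--     # Single character-level scan per row: a small state machine that counts
--     # confirmed separator spaces (spaces later followed by a non-whitespace
--     # char, i.e. spaces inside the stripped region), instead of strip+split.
--     length = []
--     for row in df_text:
--         total = 0      # spaces confirmed to lie inside the stripped region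
--         pending = 0    # spaces seen since the last non-whitespace char
--         seen = False   # any non-whitespace char seen yet
--         for c in row:
--             if c == ' ':
--                 if seen:
--                     pending += 1
--             elif not c.isspace():
--                 total += pending
--                 pending = 0
--                 seen = True
--         length.append(total + 1 if seen else 0)
--     return length
-- ===== Notes on version B (the rewrite author's own statement) =====
-- stated objective: alternative
-- what changed: B replaces strip+split+len entirely by a single character-level scan of each row: a state machine with (total, pending, seen) counts spaces that are confirmed to lie between non-whitespace characters, so neither a stripped copy of the string nor a token list is ever built.
import Mathlib
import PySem

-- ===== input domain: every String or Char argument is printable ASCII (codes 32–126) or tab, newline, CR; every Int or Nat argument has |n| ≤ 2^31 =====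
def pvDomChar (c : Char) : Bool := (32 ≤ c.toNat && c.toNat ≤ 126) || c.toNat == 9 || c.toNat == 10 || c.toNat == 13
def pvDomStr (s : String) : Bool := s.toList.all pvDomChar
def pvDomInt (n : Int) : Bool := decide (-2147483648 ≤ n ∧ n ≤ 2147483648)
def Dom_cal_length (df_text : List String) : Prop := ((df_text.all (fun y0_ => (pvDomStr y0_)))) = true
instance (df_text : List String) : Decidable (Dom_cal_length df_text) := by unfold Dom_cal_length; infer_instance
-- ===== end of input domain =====

-- B computes each row's value by a single character-level state machine
-- (counting spaces confirmed to lie between non-whitespace chars) instead of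
-- A's strip+split+len over materialized lists: an alternative of the same cost.


-- ===== PORT A =====
-- row.strip().split(' ') always yields a nonempty list, so row[0] never raises;
-- pyGet? … |>.getD "" is that always-some index read.
def cal_length (df_text : List String) : List Int :=
  df_text.foldl
    (fun length row =>
      let parts := (PySem.Str.split? (PySem.Str.strip row) " ").getD []
      if (PySem.List.pyGet? parts 0).getD "" ≠ "" then
        length ++ [(parts.length : Int)]
      else
        length ++ [(0 : Int)])
    []

-- ===== PORT B =====
-- inner-loop body of Source B: state (total, pending, seen)
def pvScanStep (st : Int × Int × Bool) (c : Char) : Int × Int × Bool :=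
  if c = ' ' then
    if st.2.2 then (st.1, st.2.1 + 1, st.2.2) else st
  else if PySem.Chars.isspace c = false then
    (st.1 + st.2.1, 0, true)
  else st

def cal_length_alt (df_text : List String) : List Int :=
  df_text.foldl
    (fun length row =>
      let st := row.toList.foldl pvScanStep (0, 0, false)
      length ++ [if st.2.2 then st.1 + 1 else 0])
    []

-- ===== PRECONDITION & SPEC =====
def Spec_cal_length (df_text : List String) (out : List Int) : Prop := out = cal_length_alt df_text
instance (df_text : List String) (out : List Int) : Decidable (Spec_cal_length df_text out) := by unfold Spec_cal_length; infer_instance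

-- ===== CLAIM (what is proved, stated in full; the proofs are below) =====
def Claim_equal_cal_length : Prop := ∀ (df_text : List String), Dom_cal_length df_text → Spec_cal_length df_text (cal_length df_text)

-- ===== LEMMAS AND PROOFS =====

/-- Reference splitter on a single space: the parts of `l` separated by `' '`. -/
def pvSplitSp : List Char → List (List Char)
  | [] => [[]]
  | c :: t => if c = ' ' then [] :: pvSplitSp t else (pvSplitSp t).modifyHead (c :: ·)

theorem pvSplitSp_ne_nil (l : List Char) : pvSplitSp l ≠ [] := by
  induction l with
  | nil => simp [pvSplitSp]
  | cons c t ih =>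
    simp only [pvSplitSp]
    split_ifs <;> simp_all [List.modifyHead]
    cases h : pvSplitSp t <;> simp_all

theorem pvSplitSp_length (l : List Char) :
    (pvSplitSp l).length = l.count ' ' + 1 := by
  induction l with
  | nil => simp [pvSplitSp]
  | cons c t ih =>
    simp only [pvSplitSp]
    split_ifs with h <;>
      simp_all [List.length_modifyHead]

theorem pvGo_eq_pvSplitSp (fuel : Nat) (l cur : List Char) (acc : List (List Char))
    (hf : l.length ≤ fuel) :
    PySem.Chars.splitOn.go [' '] fuel l cur acc
      = acc.reverse ++ ((pvSplitSp l).modifyHead (cur.reverse ++ ·)) := by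
  induction fuel generalizing l cur acc with
  | zero =>
    have : l = [] := by cases l <;> simp_all
    subst this
    simp [PySem.Chars.splitOn.go, pvSplitSp, List.modifyHead]
  | succ n ih =>
    cases l with
    | nil => simp [PySem.Chars.splitOn.go, pvSplitSp, List.modifyHead]
    | cons c t =>
      have ht : t.length ≤ n := by simpa using hf
      by_cases hc : c = ' '
      · subst hc
        simp only [PySem.Chars.splitOn.go, List.isPrefixOf, BEq.rfl, Bool.true_and,
          if_pos]
        rw [ih _ _ _ (by simpa using ht)]
        simp only [pvSplitSp, if_pos, List.modifyHead, List.reverse_nil,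
          List.nil_append]
        cases hpt : pvSplitSp t <;> simp [hpt]
      · have hpre : ([' '] : List Char).isPrefixOf (c :: t) = false := by
          simp [List.isPrefixOf]
          exact fun h => (hc h.symm).elim
        simp only [PySem.Chars.splitOn.go, hpre, if_neg, Bool.false_eq_true,
          not_false_iff]
        rw [ih _ _ _ ht]
        have hne := pvSplitSp_ne_nil t
        simp only [pvSplitSp, if_neg hc]
        cases hres : pvSplitSp t with
        | nil => exact absurd hres hne
        | cons p ps => simp [List.modifyHead]

theorem splitOn_single_space (l : List Char) :
    PySem.Chars.splitOn l [' '] = pvSplitSp l := by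
  unfold PySem.Chars.splitOn
  rw [pvGo_eq_pvSplitSp _ _ _ _ (by omega)]
  have hne := pvSplitSp_ne_nil l
  cases h : pvSplitSp l with
  | nil => exact absurd h hne
  | cons p ps => simp [List.modifyHead]

/-- The head of a stripped character list is never a space. -/
theorem strip_head_not_space (s : List Char) (c : Char) (t : List Char)
    (h : PySem.Chars.strip s = c :: t) : PySem.Chars.isspace c = false := by
  unfold PySem.Chars.strip PySem.Chars.rstrip PySem.Chars.lstrip at h
  set m := List.dropWhile PySem.Chars.isspace s with hm
  have hpre : (List.dropWhile PySem.Chars.isspace m.reverse).reverse <+: m := by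
    have := List.dropWhile_suffix (p := PySem.Chars.isspace) (l := m.reverse)
    have h2 := List.reverse_prefix.mpr this
    simpa using h2
  rw [h] at hpre
  obtain ⟨u, hu⟩ := hpre
  have hhead : m.head? = some c := by rw [← hu]; rfl
  cases hm2 : m with
  | nil => simp [hm2] at hhead
  | cons c' t' =>
    have : c' = c := by simp [hm2] at hhead; exact hhead
    subst this
    have := List.head?_dropWhile_not (p := PySem.Chars.isspace) (l := s)
    rw [← hm, hm2] at this
    simpa using this

theorem pyGet?_zero_cons {alpha : Type} (x : alpha) (xs : List alpha) :
    PySem.List.pyGet? (x :: xs) 0 = some x := by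
  simp [PySem.List.pyGet?, PySem.List.pyIdx?]

theorem ofList_cons_ne_empty (c : Char) (p : List Char) :
    String.ofList (c :: p) ≠ "" := by
  intro h; have := congrArg String.toList h; simp at this

/-- A's per-row value, characterised on the stripped character list. -/
theorem rowA_case (row : String) :
    (let parts := (PySem.Str.split? (PySem.Str.strip row) " ").getD []
     if (PySem.List.pyGet? parts 0).getD "" ≠ "" then
       ((parts.length : Int))
     else (0 : Int))
    = (if PySem.Chars.strip row.toList ≠ [] then
        (((PySem.Chars.strip row.toList).count ' ' : Int) + 1) else 0) := by
  have hstrip : PySem.Str.strip row = String.ofList (PySem.Chars.strip row.toList) := rfl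
  have hsplit : PySem.Str.split? (PySem.Str.strip row) " "
      = some ((pvSplitSp (PySem.Chars.strip row.toList)).map String.ofList) := by
    rw [hstrip]
    unfold PySem.Str.split? PySem.Chars.split?
    have h1 : (String.ofList (PySem.Chars.strip row.toList)).toList
        = PySem.Chars.strip row.toList := by simp
    have h2 : (" " : String).toList = [' '] := rfl
    rw [h1, h2]
    simp [splitOn_single_space]
  simp only [hsplit, Option.getD_some]
  cases hcs : PySem.Chars.strip row.toList with
  | nil =>
    simp [pvSplitSp]
  | cons c t =>
    have hcne : c ≠ ' ' := by
      have := strip_head_not_space row.toList c t hcs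
      intro h; subst h; simp [PySem.Chars.isspace] at this
    have hne := pvSplitSp_ne_nil t
    cases hpt : pvSplitSp t with
    | nil => exact absurd hpt hne
    | cons p ps =>
      have hsp : pvSplitSp (c :: t) = (c :: p) :: ps := by
        simp [pvSplitSp, hcne, hpt, List.modifyHead]
      have hlen : (pvSplitSp (c :: t)).length = (c :: t).count ' ' + 1 := pvSplitSp_length _
      rw [hsp]
      simp only [List.map_cons, pyGet?_zero_cons, Option.getD_some, ne_eq,
        ofList_cons_ne_empty, not_false_iff, if_true]
      have hl2 : ((String.ofList (c :: p) :: ps.map String.ofList).length : Int)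
          = ((c :: t).count ' ' : Int) + 1 := by
        have h3 : (String.ofList (c :: p) :: ps.map String.ofList).length
            = (pvSplitSp (c :: t)).length := by simp [hsp]
        rw [h3, hlen]; push_cast; ring
      rw [hl2]
      simp

-- ---- B-side lemmas: the state machine vs strip ----

/-- `true` iff the list contains a non-whitespace character. -/
def pvHasNW (l : List Char) : Bool := l.any (fun c => !PySem.Chars.isspace c)

/-- Structural-recursive form of `rstrip`. -/
def pvRs : List Char → List Char
  | [] => []
  | c :: t =>
    if pvRs t = [] then (if PySem.Chars.isspace c then [] else [c]) else c :: pvRs t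

theorem pvRs_eq_rstrip (l : List Char) : pvRs l = PySem.Chars.rstrip l := by
  induction l with
  | nil => simp [pvRs, PySem.Chars.rstrip]
  | cons c t ih =>
    unfold PySem.Chars.rstrip at *
    simp only [pvRs, List.reverse_cons, List.dropWhile_append]
    by_cases h : pvRs t = []
    · have he : (List.dropWhile PySem.Chars.isspace t.reverse) = [] := by
        have := ih; rw [h] at this
        have := congrArg List.reverse this; simpa using this.symm
      simp only [he, List.isEmpty_nil, if_pos, h, List.dropWhile]
      by_cases hc : PySem.Chars.isspace c <;> simp [hc]
    · have he : (List.dropWhile PySem.Chars.isspace t.reverse) ≠ [] := by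
        intro hnil
        apply h
        rw [ih, hnil]; rfl
      rw [if_neg h, if_neg (by simpa [List.isEmpty_iff] using he)]
      simp [ih]

theorem pvRs_nil_iff (l : List Char) : pvRs l = [] ↔ pvHasNW l = false := by
  induction l with
  | nil => simp [pvRs, pvHasNW]
  | cons c t ih =>
    simp only [pvRs, pvHasNW, List.any_cons] at *
    by_cases h : pvRs t = []
    · by_cases hc : PySem.Chars.isspace c <;> simp_all
    · simp_all

/-- Leading whitespace leaves the initial state unchanged. -/
theorem scan_skip_ws (l : List Char) :
    l.foldl pvScanStep (0, 0, false)
      = (l.dropWhile PySem.Chars.isspace).foldl pvScanStep (0, 0, false) := by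
  induction l with
  | nil => rfl
  | cons c t ih =>
    by_cases h : PySem.Chars.isspace c
    · have hstep : pvScanStep (0, 0, false) c = (0, 0, false) := by
        by_cases hc : c = ' ' <;> simp [pvScanStep, hc, h]
      simp [h, List.foldl_cons, hstep, ih]
    · simp [h]

/-- Invariant of the scan once a non-whitespace char has been seen. -/
theorem scan_seen (l : List Char) : ∀ (t p : Int),
    ∃ p', l.foldl pvScanStep (t, p, true)
      = (t + (if pvHasNW l then p + ((pvRs l).count ' ' : Int) else 0), p', true) := by
  induction l with
  | nil => intro t p; exact ⟨p, by simp [pvHasNW]⟩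
  | cons c rest ih =>
    intro t p
    by_cases hc : c = ' '
    · subst hc
      have hstep : pvScanStep (t, p, true) ' ' = (t, p + 1, true) := by
        simp [pvScanStep]
      obtain ⟨p', hp'⟩ := ih t (p + 1)
      refine ⟨p', ?_⟩
      rw [List.foldl_cons, hstep, hp']
      have hsp : PySem.Chars.isspace ' ' = true := by decide
      have hnwc : pvHasNW (' ' :: rest) = pvHasNW rest := by
        simp [pvHasNW, hsp]
      rw [hnwc]
      by_cases hnw : pvHasNW rest
      · have hrs : pvRs rest ≠ [] := by
          rw [Ne, pvRs_nil_iff]; simp [hnw]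
        have hrc : pvRs (' ' :: rest) = ' ' :: pvRs rest := by
          simp [pvRs, hrs]
        rw [if_pos hnw, if_pos hnw, hrc]
        simp
        ring_nf
      · rw [if_neg (by simp [hnw]), if_neg (by simp [hnw])]
    · by_cases hw : PySem.Chars.isspace c
      · have hstep : pvScanStep (t, p, true) c = (t, p, true) := by
          simp [pvScanStep, hc, hw]
        obtain ⟨p', hp'⟩ := ih t p
        refine ⟨p', ?_⟩
        rw [List.foldl_cons, hstep, hp']
        have hnwc : pvHasNW (c :: rest) = pvHasNW rest := by
          simp [pvHasNW, hw]
        rw [hnwc]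
        by_cases hnw : pvHasNW rest
        · have hrs : pvRs rest ≠ [] := by
            rw [Ne, pvRs_nil_iff]; simp [hnw]
          have : pvRs (c :: rest) = c :: pvRs rest := by
            simp [pvRs, hrs]
          rw [if_pos hnw, if_pos hnw, this]
          simp [hc]
        · rw [if_neg (by simp [hnw]), if_neg (by simp [hnw])]
      · have hstep : pvScanStep (t, p, true) c = (t + p, 0, true) := by
          simp [pvScanStep, hc, hw]
        obtain ⟨p', hp'⟩ := ih (t + p) 0
        refine ⟨p', ?_⟩
        rw [List.foldl_cons, hstep, hp']
        have hnwc : pvHasNW (c :: rest) = true := by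
          simp [pvHasNW, hw]
        rw [hnwc, if_pos rfl]
        by_cases hnw : pvHasNW rest
        · have hrs : pvRs rest ≠ [] := by
            rw [Ne, pvRs_nil_iff]; simp [hnw]
          have : pvRs (c :: rest) = c :: pvRs rest := by
            simp [pvRs, hrs]
          rw [if_pos hnw, this]
          simp [hc]
          ring
        · have hrs : pvRs rest = [] := by rw [pvRs_nil_iff]; simpa using hnw
          have : pvRs (c :: rest) = [c] := by
            simp [pvRs, hrs, hw]
          rw [if_neg (by simp [hnw]), this]
          simp [hc]

/-- B's per-row value equals A's, characterised on the stripped char list. -/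
theorem rowB_case (row : String) :
    (let st := row.toList.foldl pvScanStep ((0 : Int), (0 : Int), false)
     if st.2.2 then st.1 + 1 else 0)
    = (if PySem.Chars.strip row.toList ≠ [] then
        (((PySem.Chars.strip row.toList).count ' ' : Int) + 1) else 0) := by
  have hstrip : PySem.Chars.strip row.toList
      = pvRs (row.toList.dropWhile PySem.Chars.isspace) := by
    rw [pvRs_eq_rstrip]; rfl
  rw [scan_skip_ws]
  cases hm : row.toList.dropWhile PySem.Chars.isspace with
  | nil => simp [hstrip, hm, pvRs]
  | cons c t =>
    have hcw : PySem.Chars.isspace c = false := by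
      have := List.head?_dropWhile_not (p := PySem.Chars.isspace) (l := row.toList)
      rw [hm] at this; simpa using this
    have hcne : c ≠ ' ' := by
      intro h; subst h; simp [PySem.Chars.isspace] at hcw
    have hstep : pvScanStep ((0 : Int), (0 : Int), false) c = (0, 0, true) := by
      simp [pvScanStep, hcne, hcw]
    obtain ⟨p', hp'⟩ := scan_seen t 0 0
    simp only [List.foldl_cons, hstep, hp']
    rw [hstrip, hm]
    by_cases hnw : pvHasNW t
    · have hrs : pvRs t ≠ [] := by
        rw [Ne, pvRs_nil_iff]; simp [hnw]
      have hrc : pvRs (c :: t) = c :: pvRs t := by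
        simp [pvRs, hrs]
      rw [hrc, if_pos hnw]
      simp [hcne]
    · have hrs : pvRs t = [] := by rw [pvRs_nil_iff]; simpa using hnw
      have hrc : pvRs (c :: t) = [c] := by
        simp [pvRs, hrs, hcw]
      rw [hrc, if_pos (by simp), if_neg (by simp [hnw])]
      simp [hcne]

-- ===== VERDICT (by name: the statement is the Claim_ definition above) =====
theorem cal_length_spec : Claim_equal_cal_length := by
  intro df_text _
  unfold Spec_cal_length cal_length cal_length_alt
  have hfun : (fun (length : List Int) (row : String) =>
      let parts := (PySem.Str.split? (PySem.Str.strip row) " ").getD []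
      if (PySem.List.pyGet? parts 0).getD "" ≠ "" then length ++ [(parts.length : Int)]
      else length ++ [(0 : Int)])
    = (fun (length : List Int) (row : String) =>
      let st := row.toList.foldl pvScanStep ((0 : Int), (0 : Int), false)
      length ++ [if st.2.2 then st.1 + 1 else 0]) := by
    funext length row
    have hA := rowA_case row
    have hB := rowB_case row
    dsimp only at hA hB ⊢
    rw [← apply_ite (fun v : Int => length ++ [v]), hA, ← hB,
      apply_ite (fun v : Int => length ++ [v])]
  rw [hfun]
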